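-- pv_equiv track=rewrite | github.com/hzh000sunny/CodeAsk | src/codeask/wiki/sources/service.py | _derive_display_name_from_paths
-- ===== SOURCE A (Python) =====
-- def _derive_display_name_from_paths(paths: list[str]) -> str | None:
--     if not paths:
--         return None
--     first_segments = {path.split("/", 1)[0].strip() for path in paths if path.strip()}
--     first_segments.discard("")
--     if len(first_segments) == 1:
--         return next(iter(first_segments))
--     if len(paths) == 1:
--         leaf = paths[0].rsplit("/", 1)[-1].strip()
--         if "." in leaf:
--             leaf = leaf.rsplit(".", 1)[0]
--         return leaf or None
--     return None
-- ===== SOURCE B (Python) =====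
-- def _derive_display_name_from_paths(paths: list[str]) -> str | None:
--     candidate = None
--     multiple = False
--     for path in paths:
--         if not path.strip():
--             continue
--         seg = path.split("/", 1)[0].strip()
--         if not seg:
--             continue
--         if candidate is None:
--             candidate = seg
--         elif seg != candidate:
--             multiple = True
--             break
--     if candidate is not None and not multiple:
--         return candidate
--     if len(paths) == 1:
--         leaf = paths[0].rsplit("/", 1)[-1].strip()
--         if "." in leaf:
--             leaf = leaf.rsplit(".", 1)[0]
--         return leaf or None
--     return None
-- ===== Notes on version B (the rewrite author's own statement) =====
-- stated objective: simpler
-- what changed: Replaces A's set-comprehension over all paths plus discard('') and a set-size test by a single scan keeping only the first candidate segment and a 'multiple' flag, exiting early at the second distinct segment.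
import Mathlib
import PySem

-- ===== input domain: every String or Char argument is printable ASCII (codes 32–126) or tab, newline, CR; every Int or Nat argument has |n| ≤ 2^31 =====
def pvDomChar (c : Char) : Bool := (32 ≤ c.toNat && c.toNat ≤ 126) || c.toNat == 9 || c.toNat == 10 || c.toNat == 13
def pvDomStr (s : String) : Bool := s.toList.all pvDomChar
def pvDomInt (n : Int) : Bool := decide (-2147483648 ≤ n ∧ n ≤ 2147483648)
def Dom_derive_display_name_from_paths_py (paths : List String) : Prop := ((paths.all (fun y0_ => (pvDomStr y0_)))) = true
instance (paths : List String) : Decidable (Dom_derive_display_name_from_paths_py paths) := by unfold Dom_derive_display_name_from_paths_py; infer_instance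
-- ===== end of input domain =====

-- B replaces A's set-comprehension + discard + len test by a single early-exiting scalar scan
-- (first candidate segment + a 'multiple' flag); same return value everywhere, objective: simpler.

-- ===== PORT A =====
-- path.split("/", 1)[0].strip(): element [0] of a maxsplit-1 split is exactly the prefix
-- before the first '/' (the whole string if there is none) — takeWhile is exact here.
def pvSegA (p : String) : String :=
  String.mk (PySem.Chars.strip (p.toList.takeWhile (fun c => c != '/')))

-- paths[0].rsplit("/", 1)[-1]: exactly the suffix after the LAST '/' (whole string if none).
def pvAfterLastSlashA (cs : List Char) : List Char :=
  (cs.reverse.takeWhile (fun c => c != '/')).reverse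

-- leaf.rsplit(".", 1)[0], used only when '.' ∈ leaf: exactly the part before the LAST '.'.
def pvBeforeLastDotA (cs : List Char) : List Char :=
  ((cs.reverse.dropWhile (fun c => c != '.')).tail).reverse

def pvLeafA (p0 : String) : Option String :=
  let leaf := PySem.Chars.strip (pvAfterLastSlashA p0.toList)
  let leaf := if PySem.Chars.isIn ['.'] leaf then pvBeforeLastDotA leaf else leaf
  if leaf = [] then none else some (String.mk leaf)

def derive_display_name_from_paths_py (paths : List String) : Option String :=
  if paths = [] then none
  else
    let first_segments : PySem.Set String :=
      PySem.Set.ofList ((paths.filter (fun p => PySem.Str.strip p != "")).map pvSegA)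
    let first_segments := PySem.Set.discard first_segments ""
    if PySem.Set.len first_segments = 1 then
      first_segments.head?   -- next(iter(s)) on a 1-element set: order-independent
    else if paths.length = 1 then pvLeafA (paths.headD "")   -- paths[0]; paths ≠ [] here
    else none

-- ===== PORT B =====
def pvSegB (p : String) : String :=
  String.mk (PySem.Chars.strip (p.toList.takeWhile (fun c => c != '/')))

def pvAfterLastSlashB (cs : List Char) : List Char :=
  (cs.reverse.takeWhile (fun c => c != '/')).reverse

def pvBeforeLastDotB (cs : List Char) : List Char :=
  ((cs.reverse.dropWhile (fun c => c != '.')).tail).reverse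

def pvLeafB (p0 : String) : Option String :=
  let leaf := PySem.Chars.strip (pvAfterLastSlashB p0.toList)
  let leaf := if PySem.Chars.isIn ['.'] leaf then pvBeforeLastDotB leaf else leaf
  if leaf = [] then none else some (String.mk leaf)

-- the for-loop with 'continue'/'break': (candidate, multiple) state, early exit on mismatch
def pvScanB : List String → Option String → Option String × Bool
  | [], cand => (cand, false)
  | p :: rest, cand =>
    if PySem.Str.strip p = "" then pvScanB rest cand
    else
      let seg := pvSegB p
      if seg = "" then pvScanB rest cand
      else
        match cand with
        | none => pvScanB rest (some seg)
        | some c => if seg != c then (some c, true) else pvScanB rest (some c)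

def derive_display_name_from_paths_py_alt (paths : List String) : Option String :=
  match pvScanB paths none with
  | (some c, false) => some c
  | _ =>
    if paths.length = 1 then pvLeafB (paths.headD "")
    else none

-- ===== PRECONDITION & SPEC =====
def Spec_derive_display_name_from_paths_py (paths : List String) (out : Option String) : Prop := out = derive_display_name_from_paths_py_alt paths
instance (paths : List String) (out : Option String) : Decidable (Spec_derive_display_name_from_paths_py paths out) := by unfold Spec_derive_display_name_from_paths_py; infer_instance

-- ===== CLAIM (what is proved, stated in full; the proofs are below) =====
def Claim_equal_derive_display_name_from_paths_py : Prop := ∀ (paths : List String), Dom_derive_display_name_from_paths_py paths → Spec_derive_display_name_from_paths_py paths (derive_display_name_from_paths_py paths)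

-- ===== LEMMAS AND PROOFS =====

-- the list of non-blank, non-empty first segments, in order
def pvValid (paths : List String) : List String :=
  ((paths.filter (fun p => PySem.Str.strip p != "")).map pvSegA).filter (fun s => s != "")

theorem pvValid_cons (p : String) (rest : List String) :
    pvValid (p :: rest) =
      if PySem.Str.strip p = "" then pvValid rest
      else if pvSegA p = "" then pvValid rest
      else pvSegA p :: pvValid rest := by
  by_cases h1 : PySem.Str.strip p = "" <;>
    by_cases h2 : pvSegA p = "" <;>
      simp [pvValid, List.map_cons, h1, h2]

-- filtering commutes with Set.ofList (first-occurrence dedup)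
theorem filter_foldl_add (q : String → Bool) (xs : List String) (s : List String) :
    (xs.foldl PySem.Set.add s).filter q = (xs.filter q).foldl PySem.Set.add (s.filter q) := by
  induction xs generalizing s with
  | nil => simp
  | cons x xs ih =>
    by_cases hq : q x = true
    · simp only [List.foldl_cons, List.filter_cons, hq, if_pos]
      rw [ih]
      congr 1
      by_cases hm : x ∈ s
      · have hmf : x ∈ s.filter q := List.mem_filter.mpr ⟨hm, hq⟩
        simp [PySem.Set.add, hm, hmf]
      · have hmf : x ∉ s.filter q := fun hx => hm (List.mem_filter.mp hx).1
        simp [PySem.Set.add, hm, hmf, List.filter_append, hq]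
    · simp only [List.foldl_cons, List.filter_cons, hq, Bool.false_eq_true, if_false]
      have hstep : List.filter q (PySem.Set.add s x) = List.filter q s := by
        by_cases hm : x ∈ s
        · simp [PySem.Set.add, hm]
        · simp [PySem.Set.add, hm, List.filter_append, hq]
      rw [ih, hstep]

theorem filter_ofList (q : String → Bool) (xs : List String) :
    (PySem.Set.ofList xs).filter q = PySem.Set.ofList (xs.filter q) := by
  simpa [PySem.Set.ofList, PySem.Set.empty] using filter_foldl_add q xs []

theorem discard_ofList (xs : List String) :
    PySem.Set.discard (PySem.Set.ofList xs) "" = PySem.Set.ofList (xs.filter (fun s => s != "")) := by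
  simpa [PySem.Set.discard] using filter_ofList (fun s => s != "") xs

-- A's first_segments (after discard) is Set.ofList (pvValid paths)
theorem segs_eq (paths : List String) :
    PySem.Set.discard
      (PySem.Set.ofList ((paths.filter (fun p => PySem.Str.strip p != "")).map pvSegA)) ""
      = PySem.Set.ofList (pvValid paths) := by
  rw [discard_ofList]; rfl

theorem ofList_all_eq (h : String) (t : List String) (ha : ∀ x ∈ t, x = h) :
    PySem.Set.ofList (h :: t) = [h] := by
  have : ∀ t' : List String, (∀ x ∈ t', x = h) → t'.foldl PySem.Set.add [h] = [h] := by
    intro t'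
    induction t' with
    | nil => intro _; rfl
    | cons x xs ih =>
      intro hx
      have hxh : x = h := hx x (by simp)
      have : PySem.Set.add [h] x = [h] := by simp [PySem.Set.add, hxh]
      simp only [List.foldl_cons, this]
      exact ih (fun y hy => hx y (by simp [hy]))
  simpa [PySem.Set.ofList, PySem.Set.empty, PySem.Set.add] using this t ha

theorem len_one_iff (V : List String) :
    (PySem.Set.ofList V).length = 1 ↔ ∃ h t, V = h :: t ∧ ∀ x ∈ t, x = h := by
  constructor
  · intro hlen
    obtain ⟨a, hV⟩ := List.length_eq_one_iff.mp hlen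
    cases V with
    | nil => simp [PySem.Set.ofList, PySem.Set.empty] at hV
    | cons h t =>
      refine ⟨h, t, rfl, ?_⟩
      intro x hx
      have hxm : x ∈ PySem.Set.ofList (h :: t) := (PySem.Set.mem_ofList _ _).mpr (by simp [hx])
      have hhm : h ∈ PySem.Set.ofList (h :: t) := (PySem.Set.mem_ofList _ _).mpr (by simp)
      rw [hV] at hxm hhm
      simp at hxm hhm; rw [hxm, hhm]
  · rintro ⟨h, t, rfl, ha⟩
    rw [ofList_all_eq h t ha]; rfl

-- B's scan characterised by pvValid
theorem scan_some (paths : List String) (c : String) :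
    pvScanB paths (some c) = (some c, (pvValid paths).any (fun x => x != c)) := by
  induction paths with
  | nil => simp [pvScanB, pvValid]
  | cons p rest ih =>
    rw [pvScanB]
    by_cases h1 : PySem.Str.strip p = ""
    · simp [h1, ih, pvValid_cons]
    · by_cases h2 : pvSegA p = ""
      · simp only [h1, if_false]
        have : pvSegB p = "" := h2
        simp [this, ih, pvValid_cons, h1, h2]
      · have hsB : pvSegB p = pvSegA p := rfl
        simp only [h1, if_false, hsB, h2, if_false]
        by_cases h3 : pvSegA p = c
        · have hc : ¬ c = "" := by rw [← h3]; exact h2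
          simp [h3, ih, pvValid_cons, h1, hc]
        · have : (pvSegA p != c) = true := by simp [h3]
          simp [this, pvValid_cons, h1, h2]

theorem scan_none (paths : List String) :
    pvScanB paths none =
      match pvValid paths with
      | [] => (none, false)
      | h :: t => (some h, t.any (fun x => x != h)) := by
  induction paths with
  | nil => simp [pvScanB, pvValid]
  | cons p rest ih =>
    rw [pvScanB]
    by_cases h1 : PySem.Str.strip p = ""
    · simp [h1, ih, pvValid_cons]
    · by_cases h2 : pvSegA p = ""
      · have : pvSegB p = "" := h2
        simp [h1, this, ih, pvValid_cons, h2]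
      · have hsB : pvSegB p = pvSegA p := rfl
        simp only [h1, if_false, hsB, h2, if_false]
        rw [scan_some, pvValid_cons]
        simp [h1, h2]

theorem any_ne_false_iff (t : List String) (h : String) :
    (t.any (fun x => x != h)) = false ↔ ∀ x ∈ t, x = h := by
  simp

-- ===== VERDICT (by name: the statement is the Claim_ definition above) =====
theorem derive_display_name_from_paths_py_spec : Claim_equal_derive_display_name_from_paths_py := by
  intro paths _
  unfold Spec_derive_display_name_from_paths_py
  unfold derive_display_name_from_paths_py derive_display_name_from_paths_py_alt
  by_cases hnil : paths = []
  · subst hnil; rfl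
  · simp only [hnil, if_false]
    rw [segs_eq, scan_none]
    cases hV : pvValid paths with
    | nil =>
      have hlen : ¬ (PySem.Set.len (PySem.Set.ofList ([] : List String)) = 1) := by
        simp [PySem.Set.len, PySem.Set.ofList, PySem.Set.empty]
      rw [if_neg hlen]
      rfl
    | cons h t =>
      by_cases hall : ∀ x ∈ t, x = h
      · have hof : PySem.Set.ofList (h :: t) = [h] := ofList_all_eq h t hall
        have hany : (t.any (fun x => x != h)) = false := (any_ne_false_iff t h).mpr hall
        simp [PySem.Set.len, hof, hany]
      · have hlen : ¬ (PySem.Set.len (PySem.Set.ofList (h :: t)) = 1) := by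
          intro hc
          have hl : (PySem.Set.ofList (h :: t)).length = 1 := by
            simpa [PySem.Set.len] using hc
          obtain ⟨h', t', hV', hall'⟩ := (len_one_iff (h :: t)).mp hl
          cases hV'
          exact hall hall'
        have hany : (t.any (fun x => x != h)) = true := by
          by_contra hc
          exact hall ((any_ne_false_iff t h).mp (by simpa using hc))
        rw [if_neg hlen]
        simp only [hany]
        rfl
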